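-- pv_equiv track=rewrite | github.com/xiaochang91/tapyr | _TFL/predicate.py | sliced
-- ===== SOURCE A (Python) =====
-- import itertools
--
-- def sliced (iterable, length) :
--     """Generate all slices of size `length` in `iterable`.
--
--         >>> l = range (20)
--         >>> for s in sliced (l, 3) :
--         ...   print s
--         ...
--         (0, 1, 2)
--         (3, 4, 5)
--         (6, 7, 8)
--         (9, 10, 11)
--         (12, 13, 14)
--         (15, 16, 17)
--         (18, 19)
--         >>> for s in sliced (l, 5) :
--         ...   print s
--         ...
--         (0, 1, 2, 3, 4)
--         (5, 6, 7, 8, 9)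
--         (10, 11, 12, 13, 14)
--         (15, 16, 17, 18, 19)
--         >>> for s in sliced (l, 8) :
--         ...   print s
--         ...
--         (0, 1, 2, 3, 4, 5, 6, 7)
--         (8, 9, 10, 11, 12, 13, 14, 15)
--         (16, 17, 18, 19)
--         >>> for s in sliced (l, 10) :
--         ...   print s
--         ...
--         (0, 1, 2, 3, 4, 5, 6, 7, 8, 9)
--         (10, 11, 12, 13, 14, 15, 16, 17, 18, 19)
--     """
--     it = iter (iterable)
--     while True :
--         next = tuple (itertools.islice (it, None, length))
--         if next :
--             yield next
--         else :
--             break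
-- ===== SOURCE B (Python) =====
-- def sliced(iterable, length):
--     # per-element accumulation into a buffer, flushed whenever it reaches `length`
--     if length == 0:
--         return
--     buf = []
--     for x in iterable:
--         buf.append(x)
--         if len(buf) == length:
--             yield tuple(buf)
--             buf = []
--     if buf:
--         yield tuple(buf)
-- ===== Notes on version B (the rewrite author's own statement) =====
-- stated objective: alternative
-- what changed: Replaces repeated itertools.islice block-slicing in a while-True loop by a single for-loop that accumulates elements into a buffer and flushes it each time it fills.
import Mathlib
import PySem

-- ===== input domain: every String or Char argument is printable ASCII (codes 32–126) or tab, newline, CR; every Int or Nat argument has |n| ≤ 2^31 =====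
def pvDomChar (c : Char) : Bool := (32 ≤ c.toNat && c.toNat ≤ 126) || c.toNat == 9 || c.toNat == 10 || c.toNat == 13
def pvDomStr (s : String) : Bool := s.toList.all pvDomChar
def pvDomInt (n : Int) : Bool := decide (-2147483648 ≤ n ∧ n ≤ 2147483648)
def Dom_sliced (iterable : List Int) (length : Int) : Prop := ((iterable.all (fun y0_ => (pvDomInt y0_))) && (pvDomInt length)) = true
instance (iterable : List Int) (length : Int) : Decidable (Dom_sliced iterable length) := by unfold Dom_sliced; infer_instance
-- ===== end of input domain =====

-- B replaces islice block-slicing by per-element buffer accumulation (alternative decomposition, same cost).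

-- ===== PORT A =====
-- while True: next = tuple(islice(it, None, length)); yield or break.
-- `length.toNat` is only reached with 0 ≤ length (Pre_ excludes negative length, where islice raises ValueError).
def slicedGo (n : Nat) (it : List Int) : List (List Int) :=
  let next := it.take n
  if next = [] then [] else next :: slicedGo n (it.drop n)
termination_by it.length
decreasing_by
  rename_i h
  simp only [List.length_drop]
  have hn : n ≠ 0 := by rintro rfl; simp [next] at h
  have hit : it ≠ [] := by rintro rfl; simp [next] at h
  have : 0 < it.length := List.length_pos_iff.mpr hit
  omega

def sliced (iterable : List Int) (length : Int) : List (List Int) :=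
  slicedGo length.toNat iterable

-- ===== PORT B =====
-- for x in iterable: buf.append(x); if len(buf) == length: yield tuple(buf); buf = []  — then flush buf.
def slicedAltGo (n : Int) : List Int → List Int → List (List Int)
  | [], buf => if buf = [] then [] else [buf]
  | x :: xs, buf =>
      let buf' := buf ++ [x]
      if (buf'.length : Int) = n then buf' :: slicedAltGo n xs [] else slicedAltGo n xs buf'

def sliced_alt (iterable : List Int) (length : Int) : List (List Int) :=
  if length = 0 then [] else slicedAltGo length iterable []

-- ===== PRECONDITION & SPEC =====
-- Pre_ excludes negative length, on which A raises ValueError (islice rejects a negative stop).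
def Pre_sliced (iterable : List Int) (length : Int) : Prop := 0 ≤ length
instance (iterable : List Int) (length : Int) : Decidable (Pre_sliced iterable length) := by unfold Pre_sliced; infer_instance
def pvWitness_sliced : List Int × Int := ([1, 2, 3, 4, 5], 2)

def Spec_sliced (iterable : List Int) (length : Int) (out : List (List Int)) : Prop := out = sliced_alt iterable length
instance (iterable : List Int) (length : Int) (out : List (List Int)) : Decidable (Spec_sliced iterable length out) := by unfold Spec_sliced; infer_instance

-- ===== CLAIM (what is proved, stated in full; the proofs are below) =====
def Claim_equal_sliced : Prop := ∀ (iterable : List Int) (length : Int), Dom_sliced iterable length → Pre_sliced iterable length → Spec_sliced iterable length (sliced iterable length)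

-- ===== LEMMAS AND PROOFS =====

-- Invariant: with a partially filled buffer, B's loop computes A's chunks of buf ++ xs.
theorem altGo_eq_go (n : Nat) (xs : List Int) : ∀ (buf : List Int), 0 < n → buf.length < n →
    slicedAltGo (n : Int) xs buf = slicedGo n (buf ++ xs) := by
  induction xs with
  | nil =>
      intro buf hn hlt
      rw [slicedGo]
      simp only [List.append_nil, slicedAltGo]
      rcases buf with _ | ⟨b, bs⟩
      · simp
      · have htake : (b :: bs).take n = b :: bs := List.take_of_length_le (by omega)
        have hdrop : (b :: bs).drop n = [] := List.drop_eq_nil_of_le (by omega)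
        simp only [htake, hdrop]
        rw [slicedGo]
        simp
  | cons x xs ih =>
      intro buf hn hlt
      simp only [slicedAltGo]
      by_cases hfull : (buf ++ [x]).length = n
      · rw [if_pos (show ((buf ++ [x]).length : Int) = (n : Int) by exact_mod_cast hfull)]
        rw [slicedGo]
        have hsplit : buf ++ x :: xs = (buf ++ [x]) ++ xs := by simp
        have htake : (buf ++ x :: xs).take n = buf ++ [x] := by
          rw [hsplit, ← hfull, List.take_left]
        have hdrop : (buf ++ x :: xs).drop n = xs := by
          rw [hsplit, ← hfull, List.drop_left]
        have hne : buf ++ [x] ≠ [] := by simp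
        simp only [htake, hdrop, if_neg hne]
        rw [ih [] hn (by simpa using hn)]
        simp
      · have hlen : (buf ++ [x]).length < n := by simp at hfull ⊢; omega
        rw [if_neg (by exact_mod_cast hfull)]
        rw [ih (buf ++ [x]) hn hlen]
        simp

-- ===== VERDICT (by name: the statement is the Claim_ definition above) =====
theorem sliced_spec : Claim_equal_sliced := by
  intro iterable length _ hpre
  unfold Spec_sliced sliced sliced_alt
  by_cases h0 : length = 0
  · subst h0
    rw [slicedGo]
    simp
  · have hpos : 0 < length.toNat := by unfold Pre_sliced at hpre; omega
    rw [if_neg h0]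
    have hc : (length.toNat : Int) = length := Int.toNat_of_nonneg hpre
    have h := altGo_eq_go length.toNat iterable [] hpos (by simpa using hpos)
    rw [hc, List.nil_append] at h
    exact h.symm
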